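-- pv_equiv track=rewrite | github.com/sudog1/Algorithm | 프로그래머스/lv1/92334. 신고 결과 받기/신고 결과 받기.py | solution
-- ===== SOURCE A (Python) =====
-- def solution(id_list, report, k):
--     report_state = {}
--     for a, b in map(lambda x: x.split(), report):
--         if b not in report_state:
--             report_state[b] = {a}
--         else:
--             report_state[b].add(a)
--
--     receive_mail = {i: 0 for i in id_list}
--     for b in report_state:
--         if len(report_state[b]) >= k:
--             for a in report_state[b]:
--                 receive_mail[a] += 1
--
--     return list(map(lambda x: receive_mail[x], id_list))
-- ===== SOURCE B (Python) =====
-- def solution(id_list, report, k):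
--     pairs = {tuple(r.split()) for r in report}
--
--     def distinct_reporters(u):
--         return sum(1 for p in pairs if p[1] == u)
--
--     return [sum(1 for a, b in pairs if a == x and distinct_reporters(b) >= k)
--             for x in id_list]
-- ===== Notes on version B (the rewrite author's own statement) =====
-- stated objective: alternative
-- what changed: B drops all dict/counter accumulation: after deduplicating report lines into a set of pairs, it computes each output entry directly as a closed-form count -- the number of deduped pairs (x,b) whose reported user b has at least k distinct reporters (itself a direct scan-count) -- instead of A's grouped reporter-sets dict with a nested increment loop into a mail dict.
import Mathlib
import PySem

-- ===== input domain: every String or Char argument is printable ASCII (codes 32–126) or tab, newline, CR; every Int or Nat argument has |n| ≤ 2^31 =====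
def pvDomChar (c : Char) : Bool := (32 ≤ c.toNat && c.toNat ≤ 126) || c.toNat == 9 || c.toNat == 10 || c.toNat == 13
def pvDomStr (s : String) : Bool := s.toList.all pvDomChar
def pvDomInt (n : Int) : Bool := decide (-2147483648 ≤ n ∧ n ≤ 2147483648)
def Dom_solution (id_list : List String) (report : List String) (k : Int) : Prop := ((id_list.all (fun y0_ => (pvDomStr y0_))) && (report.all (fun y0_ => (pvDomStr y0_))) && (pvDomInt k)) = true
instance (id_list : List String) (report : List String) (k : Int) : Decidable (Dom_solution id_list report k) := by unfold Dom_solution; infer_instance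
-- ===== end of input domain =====

-- B replaces A's dict-of-reporter-sets plus nested increment loop by a direct closed-form count per
-- output entry over the deduplicated pairs (no mail dict, no counter); equal return value on Pre_.

-- shared helper: 'a, b = x.split()' — both Pythons raise ValueError unless the split has exactly
-- two words; those inputs are excluded by Pre_solution, the ("","") fallback is never reached there.
def pvSplit2 (s : String) : String × String :=
  match PySem.Str.split₀ s with
  | [a, b] => (a, b)
  | _ => ("", "")

-- ===== PORT A =====
-- the dict comprehension '{i: 0 for i in id_list}'
def pvInitMail (id_list : List String) : PySem.Dict String Int :=
  id_list.foldl (fun d i => d.insert i 0) PySem.Dict.empty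

-- A's first loop: report_state[b] = {a} (new set) or report_state[b].add(a) (in-place add)
def pvGroupPairs (ps : List (String × String)) : PySem.Dict String (PySem.Set String) :=
  ps.foldl (fun d p =>
    d.insert p.2 (match d.get? p.2 with
      | none => PySem.Set.ofList [p.1]
      | some s => PySem.Set.add s p.1)) PySem.Dict.empty

def solution (id_list : List String) (report : List String) (k : Int) : List Int :=
  let report_state := pvGroupPairs (report.map pvSplit2)
  let receive_mail := pvInitMail id_list
  -- 'for b in report_state: if len(report_state[b]) >= k: for a in report_state[b]: receive_mail[a] += 1'
  -- (iterating the dict = iterating the keys and looking each up; the dict is not mutated during the loop;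
  --  'receive_mail[a] += 1' raises KeyError when a is missing — those inputs are outside Pre_solution)
  let receive_mail := report_state.items.foldl (fun d bs =>
    if k ≤ PySem.List.len bs.2 then
      bs.2.foldl (fun d a => d.modify a 0 (· + 1)) d
    else d) receive_mail
  id_list.map (fun x => receive_mail.getD x 0)

-- ===== PORT B =====
-- 'def distinct_reporters(u): return sum(1 for p in pairs if p[1] == u)'
def pvDistinctReporters (pairs : PySem.Set (String × String)) (u : String) : Int :=
  ((pairs.countP (fun p => p.2 == u)) : Int)   -- sum of 1s over a filtered iteration = countP

def solution_alt (id_list : List String) (report : List String) (k : Int) : List Int :=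
  let pairs : PySem.Set (String × String) := PySem.Set.ofList (report.map pvSplit2)
  -- '[sum(1 for a, b in pairs if a == x and distinct_reporters(b) >= k) for x in id_list]'
  id_list.map (fun x =>
    ((pairs.countP (fun p => p.1 == x && decide (k ≤ pvDistinctReporters pairs p.2))) : Int))

-- ===== PRECONDITION & SPEC =====
-- Pre_ excludes exactly the inputs where Python A raises: a report line that does not split into
-- exactly two words (ValueError on unpacking, in B too), or a reporter outside id_list whose
-- reported user is reported by ≥ k distinct reporters (KeyError on receive_mail[a] += 1; B returns there).
def Pre_solution (id_list : List String) (report : List String) (k : Int) : Prop :=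
  (∀ r ∈ report, (PySem.Str.split₀ r).length = 2) ∧
  ∀ p ∈ report.map pvSplit2, p.1 ∈ id_list ∨
    ((PySem.Set.ofList (((report.map pvSplit2).filter (fun q => q.2 == p.2)).map Prod.fst)).length : Int) < k
instance (id_list : List String) (report : List String) (k : Int) : Decidable (Pre_solution id_list report k) := by
  unfold Pre_solution; infer_instance

def pvWitness_solution : List String × List String × Int := (["muzi", "frodo"], ["muzi frodo", "frodo muzi", "muzi frodo"], 1)


def Spec_solution (id_list : List String) (report : List String) (k : Int) (out : List Int) : Prop := out = solution_alt id_list report k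
instance (id_list : List String) (report : List String) (k : Int) (out : List Int) : Decidable (Spec_solution id_list report k out) := by unfold Spec_solution; infer_instance

-- ===== CLAIM (what is proved, stated in full; the proofs are below) =====
def Claim_equal_solution : Prop := ∀ (id_list : List String) (report : List String) (k : Int), Dom_solution id_list report k → Pre_solution id_list report k → Spec_solution id_list report k (solution id_list report k)

-- ===== LEMMAS AND PROOFS =====

-- proof-side abbreviations for intermediate objects
def pvSb (ps : List (String × String)) (b : String) : PySem.Set String :=
  PySem.Set.ofList ((ps.filter (fun q => q.2 == b)).map Prod.fst)

def pvBanned (k : Int) (P : List (String × String)) : PySem.Set String :=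
  PySem.Set.ofList (((P.foldl (fun d p => d.insert p.2 (d.getD p.2 0 + 1)) PySem.Dict.empty).items).filterMap
    (fun bc => if k ≤ bc.2 then some bc.1 else none))

-- the {i:0} init dict reads 0 at every key
theorem pvInit_aux (l : List String) (d : PySem.Dict String Int) (h : ∀ y, d.getD y 0 = 0) (x : String) :
    (l.foldl (fun d i => d.insert i 0) d).getD x 0 = 0 := by
  induction l generalizing d with
  | nil => exact h x
  | cons a l ih =>
    simp only [List.foldl_cons]
    exact ih _ (fun y => by rw [PySem.Dict.getD_insert]; split <;> [rfl; exact h y])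

theorem pvInit_getD (id_list : List String) (x : String) : (pvInitMail id_list).getD x 0 = 0 :=
  pvInit_aux id_list PySem.Dict.empty (fun y => PySem.Dict.getD_empty y 0) x

-- A's nested mail loop adds, per user x, the count of x in the flattened banned groups
theorem pvALoop_getD (k : Int) (L : List (String × PySem.Set String)) (d : PySem.Dict String Int) (x : String) :
    (L.foldl (fun d bs => if k ≤ PySem.List.len bs.2 then bs.2.foldl (fun d a => d.modify a 0 (· + 1)) d else d) d).getD x 0
    = d.getD x 0 + (((L.filter (fun bs => decide (k ≤ PySem.List.len bs.2))).flatMap (fun bs => bs.2)).count x : Int) := by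
  induction L generalizing d with
  | nil => simp
  | cons bs L ih =>
    by_cases hc : k ≤ PySem.List.len bs.2
    · simp only [List.foldl_cons, List.filter_cons, if_pos hc, decide_eq_true hc, if_true, List.flatMap_cons]
      rw [ih, PySem.Dict.getD_foldl_modify_add_one, List.count_append]
      push_cast; ring
    · simp only [List.foldl_cons, List.filter_cons, if_neg hc, decide_eq_false hc,
        Bool.false_eq_true, if_false]
      rw [ih]

theorem pvGroup_keys (ps : List (String × String)) :
    (pvGroupPairs ps).keys = PySem.Set.ofList (ps.map Prod.snd) := by
  have h := PySem.Dict.keys_foldl_insert_key ps Prod.snd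
    (fun d (p : String × String) => match d.get? p.2 with
      | none => PySem.Set.ofList [p.1] | some s => PySem.Set.add s p.1) PySem.Dict.empty
  rw [PySem.Dict.keys_empty, PySem.Set.update_nil_left] at h
  exact h

theorem pvGroup_keys_nodup (ps : List (String × String)) : (pvGroupPairs ps).keys.Nodup := by
  rw [pvGroup_keys]; exact PySem.Set.nodup_ofList _

-- A's grouping dict: lookup at b is the set of first components of the pairs ending in b
theorem pvGroup_get? (ps : List (String × String)) (b : String) :
    (pvGroupPairs ps).get? b = if b ∈ ps.map Prod.snd then some (pvSb ps b) else none := by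
  induction ps using List.reverseRecOn with
  | nil => simp [pvGroupPairs, PySem.Dict.get?_empty]
  | append_singleton ps p ih =>
    have hstep : pvGroupPairs (ps ++ [p]) =
        (pvGroupPairs ps).insert p.2 (match (pvGroupPairs ps).get? p.2 with
          | none => PySem.Set.ofList [p.1]
          | some s => PySem.Set.add s p.1) := by
      simp [pvGroupPairs, List.foldl_append]
    rw [hstep, PySem.Dict.get?_insert]
    by_cases hb : b = p.2
    · subst hb
      rw [if_pos rfl, ih]
      have hfil : (ps ++ [p]).filter (fun q => q.2 == p.2) = ps.filter (fun q => q.2 == p.2) ++ [p] := by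
        rw [List.filter_append]; simp
      by_cases hm : p.2 ∈ ps.map Prod.snd
      · rw [if_pos hm, if_pos (by simp)]
        congr 1
        unfold pvSb
        rw [hfil, List.map_append]
        simpa using (PySem.Set.ofList_append_singleton ((ps.filter (fun q => q.2 == p.2)).map Prod.fst) p.1).symm
      · rw [if_neg hm, if_pos (by simp)]
        congr 1
        unfold pvSb
        have hnil : ps.filter (fun q => q.2 == p.2) = [] := by
          rw [List.filter_eq_nil_iff]
          intro q hq hqb
          exact hm (List.mem_map.mpr ⟨q, hq, by simpa using hqb⟩)
        rw [hfil, hnil]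
        simp
    · rw [if_neg hb, ih]
      have hmm : (b ∈ (ps ++ [p]).map Prod.snd) ↔ b ∈ ps.map Prod.snd := by
        simp only [List.map_append, List.mem_append, List.map_cons, List.map_nil, List.mem_cons,
          List.not_mem_nil, or_false]
        constructor
        · rintro (h | h)
          · exact h
          · exact absurd h hb
        · exact Or.inl
      have hsb : pvSb (ps ++ [p]) b = pvSb ps b := by
        unfold pvSb
        rw [List.filter_append]
        have h1 : [p].filter (fun q => q.2 == b) = [] := by
          simp only [List.filter_cons, List.filter_nil, beq_iff_eq]
          rw [if_neg (by simpa using fun hh => hb hh.symm)]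
        rw [h1, List.append_nil]
      rw [hsb]
      by_cases hm : b ∈ ps.map Prod.snd
      · rw [if_pos hm, if_pos (hmm.mpr hm)]
      · rw [if_neg hm, if_neg (fun h => hm (hmm.mp h))]

theorem pvGroup_items (ps : List (String × String)) :
    (pvGroupPairs ps).items = (PySem.Set.ofList (ps.map Prod.snd)).map (fun b => (b, pvSb ps b)) := by
  rw [PySem.Dict.items_eq_map_keys _ (pvGroup_keys_nodup ps) ([] : PySem.Set String), pvGroup_keys]
  apply List.map_congr_left
  intro b hb
  have hm : b ∈ ps.map Prod.snd := (PySem.Set.mem_ofList _ _).mp hb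
  have := pvGroup_get? ps b
  rw [if_pos hm] at this
  rw [PySem.Dict.getD_of_get?_eq_some _ _ this]

-- set(…) commutes with a filter
theorem pvOfList_filter {α : Type} [BEq α] [LawfulBEq α] (q : α → Bool) (xs : List α) :
    PySem.Set.ofList (xs.filter q) = (PySem.Set.ofList xs).filter q := by
  induction xs using List.reverseRecOn with
  | nil => simp
  | append_singleton xs x ih =>
    rw [List.filter_append, PySem.Set.ofList_append_singleton, PySem.Set.add_eq_ite]
    by_cases hq : q x = true
    · simp only [List.filter_cons, List.filter_nil, hq, if_true]
      rw [PySem.Set.ofList_append_singleton, ih, PySem.Set.add_eq_ite]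
      by_cases hm : x ∈ PySem.Set.ofList xs
      · rw [if_pos hm, if_pos (List.mem_filter.mpr ⟨hm, hq⟩)]
      · rw [if_neg hm, if_neg (fun h => hm (List.mem_filter.mp h).1), List.filter_append]
        simp [hq]
    · simp only [List.filter_cons, List.filter_nil, hq, Bool.false_eq_true, if_false, List.append_nil]
      rw [ih]
      by_cases hm : x ∈ PySem.Set.ofList xs
      · rw [if_pos hm]
      · rw [if_neg hm, List.filter_append]
        simp [hq]

-- set(map fst l) = map fst (set l) when every second component of l is the same
theorem pvOfList_map_fst (b : String) (l : List (String × String)) (h : ∀ p ∈ l, p.2 = b) :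
    PySem.Set.ofList (l.map Prod.fst) = (PySem.Set.ofList l).map Prod.fst := by
  induction l using List.reverseRecOn with
  | nil => simp
  | append_singleton l p ih =>
    have hl : ∀ q ∈ l, q.2 = b := fun q hq => h q (List.mem_append_left _ hq)
    have hp : p.2 = b := h p (by simp)
    rw [List.map_append, List.map_cons, List.map_nil,
      PySem.Set.ofList_append_singleton, PySem.Set.ofList_append_singleton,
      PySem.Set.add_eq_ite, PySem.Set.add_eq_ite, ih hl]
    by_cases hm : p ∈ PySem.Set.ofList l
    · rw [if_pos hm, if_pos (List.mem_map.mpr ⟨p, hm, rfl⟩)]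
    · rw [if_neg hm, if_neg ?_, List.map_append]
      · simp
      · intro hmem
        obtain ⟨q, hq, hq1⟩ := List.mem_map.mp hmem
        have hq2 : q.2 = b := hl q ((PySem.Set.mem_ofList _ _).mp hq)
        have : q = p := Prod.ext hq1 (hq2.trans hp.symm)
        exact hm (this ▸ hq)

-- membership in the proof-side banned set
theorem pvBanned_contains (k : Int) (P : List (String × String)) (b : String) :
    (pvBanned k P).contains b = true ↔ b ∈ P.map Prod.snd ∧ k ≤ ((P.map Prod.snd).count b : Int) := by
  unfold pvBanned
  have hfold : P.foldl (fun d p => d.insert p.2 (d.getD p.2 0 + 1)) PySem.Dict.empty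
      = PySem.Dict.counter (P.map Prod.snd) := by
    rw [← PySem.Dict.foldl_insert_getD_add_one_eq_counter, List.foldl_map]
  rw [hfold, PySem.Set.contains_iff, PySem.Set.mem_ofList, List.mem_filterMap]
  constructor
  · rintro ⟨bc, hmem, hif⟩
    rw [PySem.Dict.items_counter] at hmem
    obtain ⟨b', hb', rfl⟩ := List.mem_map.mp hmem
    by_cases hk : k ≤ ((P.map Prod.snd).count b' : Int)
    · rw [if_pos hk] at hif
      cases hif
      exact ⟨(PySem.Set.mem_ofList _ _).mp hb', hk⟩
    · rw [if_neg hk] at hif; cases hif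
  · rintro ⟨hmem, hk⟩
    refine ⟨(b, ((P.map Prod.snd).count b : Int)), ?_, by rw [if_pos hk]⟩
    rw [PySem.Dict.items_counter]
    exact List.mem_map.mpr ⟨b, (PySem.Set.mem_ofList _ _).mpr hmem, rfl⟩

-- a 0/1 map-sum is a countP
theorem pvSum_ite (l : List String) (q : String → Bool) :
    (l.map (fun b => if q b then (1 : Nat) else 0)).sum = l.countP q := by
  induction l with
  | nil => rfl
  | cons a l ih =>
    simp only [List.map_cons, List.sum_cons, List.countP_cons, ih]
    by_cases hq : q a = true
    · simp [hq]; omega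
    · simp [hq]

-- the central count identity: A's flattened banned-group count = the banned-filtered pair count
theorem pvCount_eq (k : Int) (ps : List (String × String)) (x : String) :
    (((pvGroupPairs ps).items.filter (fun bs => decide (k ≤ PySem.List.len bs.2))).flatMap (fun bs => bs.2)).count x
    = ((((PySem.Set.ofList ps).filter (fun p => (pvBanned k (PySem.Set.ofList ps)).contains p.2)).map Prod.fst).count x) := by
  have hmemP : ∀ p : String × String, p ∈ PySem.Set.ofList ps ↔ p ∈ ps :=
    fun p => PySem.Set.mem_ofList ps p
  have hSb : ∀ b, pvSb ps b = ((PySem.Set.ofList ps).filter (fun q => q.2 == b)).map Prod.fst := by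
    intro b
    unfold pvSb
    rw [pvOfList_map_fst b _ (fun p hp => by simpa using (List.mem_filter.mp hp).2), pvOfList_filter]
  have hcnt : ∀ b, (pvSb ps b).length = ((PySem.Set.ofList ps).map Prod.snd).count b := by
    intro b
    rw [hSb, List.length_map, List.count_eq_countP, List.countP_map,
      List.countP_eq_length_filter]
    rfl
  have hmem_x : ∀ b, x ∈ pvSb ps b ↔ (x, b) ∈ PySem.Set.ofList ps := by
    intro b
    rw [hSb]
    constructor
    · intro h
      obtain ⟨p, hp, hfst⟩ := List.mem_map.mp h
      obtain ⟨hpP, hpb⟩ := List.mem_filter.mp hp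
      have : p = (x, b) := Prod.ext hfst (by simpa using hpb)
      exact this ▸ hpP
    · intro h
      exact List.mem_map.mpr ⟨(x, b), List.mem_filter.mpr ⟨h, by simp⟩, rfl⟩
  have hc' : ∀ b, decide (k ≤ PySem.List.len (pvSb ps b)) = true
      ↔ k ≤ ((((PySem.Set.ofList ps).map Prod.snd).count b : Nat) : Int) := by
    intro b
    rw [decide_eq_true_iff, PySem.List.len_eq, hcnt]
  have hxb : ∀ b, (x, b) ∈ PySem.Set.ofList ps → b ∈ (PySem.Set.ofList ps).map Prod.snd := by
    intro b h
    exact List.mem_map.mpr ⟨(x, b), h, rfl⟩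
  rw [pvGroup_items, List.filter_map, List.flatMap_map, List.count_flatMap]
  have h1 : List.map (List.count x ∘ fun b => ((b, pvSb ps b) : String × PySem.Set String).2)
        ((PySem.Set.ofList (ps.map Prod.snd)).filter
          ((fun bs => decide (k ≤ PySem.List.len bs.2)) ∘ fun b => (b, pvSb ps b)))
      = List.map (fun b => if decide ((x, b) ∈ PySem.Set.ofList ps) then 1 else 0)
        ((PySem.Set.ofList (ps.map Prod.snd)).filter
          ((fun bs => decide (k ≤ PySem.List.len bs.2)) ∘ fun b => (b, pvSb ps b))) := by
    apply List.map_congr_left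
    intro b _
    have hnd : (pvSb ps b).Nodup := by unfold pvSb; exact PySem.Set.nodup_ofList _
    by_cases hx : x ∈ pvSb ps b
    · simp only [Function.comp_apply]
      rw [List.count_eq_one_of_mem hnd hx, if_pos (decide_eq_true ((hmem_x b).mp hx))]
    · simp only [Function.comp_apply]
      rw [List.count_eq_zero_of_not_mem hx,
        if_neg (by simp only [decide_eq_true_eq]; exact fun h => hx ((hmem_x b).mpr h))]
  rw [h1, pvSum_ite, List.countP_filter, List.countP_eq_length_filter]
  rw [List.count_eq_countP, List.countP_map, List.countP_eq_length_filter, List.filter_filter]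
  have hnd_lp : ((PySem.Set.ofList ps).filter (fun p =>
      ((fun y => y == x) ∘ Prod.fst) p && (pvBanned k (PySem.Set.ofList ps)).contains p.2)).Nodup :=
    (PySem.Set.nodup_ofList ps).filter _
  have h2 : ∀ p ∈ ((PySem.Set.ofList ps).filter (fun p =>
      ((fun y => y == x) ∘ Prod.fst) p && (pvBanned k (PySem.Set.ofList ps)).contains p.2)), p.1 = x := by
    intro p hp
    have := (List.mem_filter.mp hp).2
    simp only [Function.comp_apply, Bool.and_eq_true, beq_iff_eq] at this
    exact this.1
  have hndmap : (((PySem.Set.ofList ps).filter (fun p =>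
      ((fun y => y == x) ∘ Prod.fst) p && (pvBanned k (PySem.Set.ofList ps)).contains p.2)).map Prod.snd).Nodup :=
    hnd_lp.map_on (fun p hp q hq hpq => Prod.ext ((h2 p hp).trans (h2 q hq).symm) hpq)
  have hnd_lb : ((PySem.Set.ofList (ps.map Prod.snd)).filter (fun b =>
      decide ((x, b) ∈ PySem.Set.ofList ps) &&
        ((fun bs => decide (k ≤ PySem.List.len bs.2)) ∘ fun b => (b, pvSb ps b)) b)).Nodup :=
    (PySem.Set.nodup_ofList _).filter _
  have hperm : (((PySem.Set.ofList ps).filter (fun p =>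
        ((fun y => y == x) ∘ Prod.fst) p && (pvBanned k (PySem.Set.ofList ps)).contains p.2)).map Prod.snd).Perm
      ((PySem.Set.ofList (ps.map Prod.snd)).filter (fun b =>
        decide ((x, b) ∈ PySem.Set.ofList ps) &&
          ((fun bs => decide (k ≤ PySem.List.len bs.2)) ∘ fun b => (b, pvSb ps b)) b)) := by
    rw [List.perm_ext_iff_of_nodup hndmap hnd_lb]
    intro b
    constructor
    · intro h
      obtain ⟨p, hp, hsnd⟩ := List.mem_map.mp h
      obtain ⟨hpP, hpred⟩ := List.mem_filter.mp hp
      simp only [Function.comp_apply, Bool.and_eq_true, beq_iff_eq] at hpred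
      have hpx : p = (x, b) := Prod.ext hpred.1 hsnd
      subst hpx
      have hban := (pvBanned_contains k (PySem.Set.ofList ps) b).mp hpred.2
      apply List.mem_filter.mpr
      refine ⟨?_, ?_⟩
      · rw [PySem.Set.mem_ofList]
        obtain ⟨q, hq, hq2⟩ := List.mem_map.mp hban.1
        exact List.mem_map.mpr ⟨q, (hmemP q).mp hq, hq2⟩
      · simp only [Function.comp_apply, Bool.and_eq_true]
        exact ⟨decide_eq_true hpP, (hc' b).mpr hban.2⟩
    · intro h
      obtain ⟨_, hpred⟩ := List.mem_filter.mp h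
      simp only [Function.comp_apply, Bool.and_eq_true, decide_eq_true_eq] at hpred
      obtain ⟨hxbP, hlen⟩ := hpred
      apply List.mem_map.mpr
      refine ⟨(x, b), List.mem_filter.mpr ⟨hxbP, ?_⟩, rfl⟩
      rw [Bool.and_eq_true]
      constructor
      · simp
      · refine (pvBanned_contains k (PySem.Set.ofList ps) b).mpr ⟨hxb b hxbP, ?_⟩
        rw [PySem.List.len_eq, hcnt] at hlen
        exact hlen
  calc ((PySem.Set.ofList (ps.map Prod.snd)).filter (fun b =>
        decide ((x, b) ∈ PySem.Set.ofList ps) &&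
          ((fun bs => decide (k ≤ PySem.List.len bs.2)) ∘ fun b => (b, pvSb ps b)) b)).length
      = (((PySem.Set.ofList ps).filter (fun p =>
          ((fun y => y == x) ∘ Prod.fst) p && (pvBanned k (PySem.Set.ofList ps)).contains p.2)).map Prod.snd).length :=
        hperm.length_eq.symm
    _ = ((PySem.Set.ofList ps).filter (fun p =>
          ((fun y => y == x) ∘ Prod.fst) p && (pvBanned k (PySem.Set.ofList ps)).contains p.2)).length :=
        List.length_map ..

-- bridge: the banned-filtered pair count is B's direct countP
theorem pvBridge (k : Int) (ps : List (String × String)) (x : String) :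
    (((PySem.Set.ofList ps).filter (fun p => (pvBanned k (PySem.Set.ofList ps)).contains p.2)).map Prod.fst).count x
    = (PySem.Set.ofList ps).countP
        (fun p => p.1 == x && decide (k ≤ pvDistinctReporters (PySem.Set.ofList ps) p.2)) := by
  rw [List.count_eq_countP, List.countP_map, List.countP_filter]
  apply List.countP_congr
  intro p hp
  have hmem : p.2 ∈ (PySem.Set.ofList ps).map Prod.snd := List.mem_map.mpr ⟨p, hp, rfl⟩
  have hcount : ((PySem.Set.ofList ps).map Prod.snd).count p.2
      = (PySem.Set.ofList ps).countP (fun q => q.2 == p.2) := by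
    rw [List.count_eq_countP, List.countP_map]
    rfl
  simp only [Function.comp_apply]
  by_cases hx : p.1 = x
  · have h1 : ((p.1 == x) : Bool) = true := by simpa using hx
    rw [h1, Bool.true_and, Bool.true_and]
    by_cases hk : k ≤ ((PySem.Set.ofList ps).map Prod.snd).count p.2
    · rw [(pvBanned_contains k (PySem.Set.ofList ps) p.2).mpr ⟨hmem, hk⟩]
      rw [hcount] at hk
      simp [pvDistinctReporters, hk]
    · have hnc : (pvBanned k (PySem.Set.ofList ps)).contains p.2 = false := by
        rw [Bool.eq_false_iff]
        intro h
        exact hk ((pvBanned_contains k (PySem.Set.ofList ps) p.2).mp h).2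
      rw [hnc]
      rw [hcount] at hk
      simp [pvDistinctReporters, hk]
  · have h1 : ((p.1 == x) : Bool) = false := by simpa using hx
    rw [h1, Bool.false_and, Bool.false_and]

-- ===== VERDICT (by name: the statement is the Claim_ definition above) =====
theorem solution_spec : Claim_equal_solution := by
  intro id_list report k _ _
  show solution id_list report k = solution_alt id_list report k
  have hA : solution id_list report k = id_list.map (fun x =>
      ((pvGroupPairs (report.map pvSplit2)).items.foldl (fun d bs =>
        if k ≤ PySem.List.len bs.2 then bs.2.foldl (fun d a => d.modify a 0 (· + 1)) d else d)
        (pvInitMail id_list)).getD x 0) := rfl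
  have hB : solution_alt id_list report k = id_list.map (fun x =>
      (((PySem.Set.ofList (report.map pvSplit2)).countP
        (fun p => p.1 == x && decide (k ≤ pvDistinctReporters (PySem.Set.ofList (report.map pvSplit2)) p.2))) : Int)) := rfl
  rw [hA, hB]
  apply List.map_congr_left
  intro x _
  rw [pvALoop_getD, pvInit_getD, pvCount_eq, pvBridge, zero_add]
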